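-- pv_equiv track=rewrite | github.com/yunqingyi/BME458_Gait_Analysis | Gait_Analysis_APP.py | find_changepoints
-- ===== SOURCE A (Python) =====
-- from collections import defaultdict
--
-- def find_changepoints(arr):
--     changepoints = defaultdict(list)
--     current_value = arr[0]
--     for (index, value) in enumerate(arr):
--         if value != current_value:
--             changepoints[str((current_value, value))].append(index)
--             current_value = value
--     return changepoints
-- ===== SOURCE B (Python) =====
-- from collections import defaultdict
-- from itertools import groupby
--
-- def find_changepoints(arr):
--     changepoints = defaultdict(list)
--     runs = [(v, len(list(g))) for v, g in groupby(arr)]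
--     idx = 0
--     for (prev, plen), (curr, _) in zip(runs, runs[1:]):
--         idx += plen
--         changepoints[str((prev, curr))].append(idx)
--     return changepoints
-- ===== Notes on version B (the rewrite author's own statement) =====
-- stated objective: alternative
-- what changed: Replaces the single enumerate scan carrying a current_value register with a run-length encoding (itertools.groupby) followed by a walk over adjacent runs that keeps a cumulative index.
import Mathlib
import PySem

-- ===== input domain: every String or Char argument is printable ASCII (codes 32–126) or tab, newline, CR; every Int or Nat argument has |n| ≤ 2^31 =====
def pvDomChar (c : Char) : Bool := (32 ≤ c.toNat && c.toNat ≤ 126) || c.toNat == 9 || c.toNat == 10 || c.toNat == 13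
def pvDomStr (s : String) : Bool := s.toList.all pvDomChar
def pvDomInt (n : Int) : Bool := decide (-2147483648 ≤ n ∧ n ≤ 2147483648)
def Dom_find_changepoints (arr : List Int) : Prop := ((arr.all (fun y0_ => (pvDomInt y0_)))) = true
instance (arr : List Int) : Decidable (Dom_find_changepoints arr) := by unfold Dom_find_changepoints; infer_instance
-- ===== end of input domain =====

-- B replaces A's enumerate scan with a groupby run-length pass plus a cumulative-index walk over
-- adjacent runs (alternative decomposition, same cost); equal return values on nonempty lists.

-- str((a, b)) for Python ints
def pvKey (a b : Int) : String := "(" ++ PySem.Int.toStr a ++ ", " ++ PySem.Int.toStr b ++ ")"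

-- ===== PORT A =====
def pvStepA (st : Int × PySem.Dict String (List Int)) (iv : Int × Int) :
    Int × PySem.Dict String (List Int) :=
  if iv.2 ≠ st.1 then
    (iv.2, st.2.modify (pvKey st.1 iv.2) [] (fun l => l ++ [iv.1]))
  else st

def find_changepoints (arr : List Int) : List (String × List Int) :=
  match PySem.List.pyGet? arr 0 with
  | none => []   -- Python raises IndexError here; excluded by Pre_
  | some cv =>
    ((PySem.List.enumerate arr).foldl pvStepA (cv, PySem.Dict.empty)).2.items

-- ===== PORT B =====
-- itertools.groupby(arr) with run lengths, front-to-back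
def pvRunsGo (v c : Int) : List Int → List (Int × Int)
  | [] => [(v, c)]
  | y :: ys => if y = v then pvRunsGo v (c + 1) ys else (v, c) :: pvRunsGo y 1 ys

def pvRuns : List Int → List (Int × Int)
  | [] => []
  | x :: xs => pvRunsGo x 1 xs

def pvStepB (st : Int × PySem.Dict String (List Int)) (pq : (Int × Int) × (Int × Int)) :
    Int × PySem.Dict String (List Int) :=
  let idx := st.1 + pq.1.2
  (idx, st.2.modify (pvKey pq.1.1 pq.2.1) [] (fun l => l ++ [idx]))

def find_changepoints_alt (arr : List Int) : List (String × List Int) :=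
  let runs := pvRuns arr
  (((runs.zip runs.tail).foldl pvStepB (0, PySem.Dict.empty)).2).items

-- ===== PRECONDITION & SPEC =====
-- A evaluates arr[0] before its loop, so it raises IndexError on the empty list; Pre_ excludes it.
def Pre_find_changepoints (arr : List Int) : Prop := arr ≠ []
instance (arr : List Int) : Decidable (Pre_find_changepoints arr) := by
  unfold Pre_find_changepoints; infer_instance

def pvWitness_find_changepoints : List Int := ([1, 1, 2, 2, 1])

def Spec_find_changepoints (arr : List Int) (out : List (String × List Int)) : Prop :=
  out = find_changepoints_alt arr
instance (arr : List Int) (out : List (String × List Int)) : Decidable (Spec_find_changepoints arr out) := by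
  unfold Spec_find_changepoints; infer_instance

-- ===== CLAIM (what is proved, stated in full; the proofs are below) =====
def Claim_equal_find_changepoints : Prop := ∀ (arr : List Int), Dom_find_changepoints arr → Pre_find_changepoints arr → Spec_find_changepoints arr (find_changepoints arr)

-- ===== LEMMAS AND PROOFS =====

-- appending one index to a key's bucket (shared shape of both folds, extracted)
def pvDStep (d : PySem.Dict String (List Int)) (p : String × Int) : PySem.Dict String (List Int) :=
  d.modify p.1 [] (fun l => l ++ [p.2])

-- the transition events A's scan produces
def pvEventsA (cur : Int) : List (Int × Int) → List (String × Int)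
  | [] => []
  | iv :: rest =>
    if iv.2 ≠ cur then (pvKey cur iv.2, iv.1) :: pvEventsA iv.2 rest
    else pvEventsA cur rest

-- the transition events B reads off adjacent runs
def pvBounds (idx : Int) : List (Int × Int) → List (String × Int)
  | [] => []
  | [_] => []
  | p :: q :: rest => (pvKey p.1 q.1, idx + p.2) :: pvBounds (idx + p.2) (q :: rest)

theorem foldA_eventsA (l : List (Int × Int)) :
    ∀ (cur : Int) (d : PySem.Dict String (List Int)),
      (l.foldl pvStepA (cur, d)).2 = (pvEventsA cur l).foldl pvDStep d := by
  induction l with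
  | nil => intro cur d; rfl
  | cons iv rest ih =>
    intro cur d
    by_cases h : iv.2 ≠ cur
    · simp [List.foldl, pvEventsA, pvStepA, pvDStep, h, ih]
    · simp [List.foldl, pvEventsA, pvStepA, pvDStep, h, ih]

theorem foldB_bounds (runs : List (Int × Int)) :
    ∀ (idx : Int) (d : PySem.Dict String (List Int)),
      ((runs.zip runs.tail).foldl pvStepB (idx, d)).2 = (pvBounds idx runs).foldl pvDStep d := by
  induction runs with
  | nil => intro idx d; rfl
  | cons p rest ih =>
    intro idx d
    cases rest with
    | nil => rfl
    | cons q rest' =>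
      simp only [List.tail_cons, List.zip_cons_cons, List.foldl, pvBounds, pvStepB, pvDStep]
      exact ih (idx + p.2) _

theorem pvRunsGo_head (l : List Int) :
    ∀ (v c : Int), ∃ k t, pvRunsGo v c l = (v, k) :: t := by
  induction l with
  | nil => intro v c; exact ⟨c, [], rfl⟩
  | cons y ys ih =>
    intro v c
    by_cases h : y = v
    · obtain ⟨k, t, hk⟩ := ih v (c + 1)
      exact ⟨k, t, by simp [pvRunsGo, h, hk]⟩
    · exact ⟨c, pvRunsGo y 1 ys, by simp [pvRunsGo, h]⟩

theorem eventsA_eq_bounds (l : List Int) :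
    ∀ (v c s : Int),
      pvEventsA v (PySem.List.enumerate l s) = pvBounds (s - c) (pvRunsGo v c l) := by
  induction l with
  | nil => intro v c s; rfl
  | cons y ys ih =>
    intro v c s
    rw [PySem.List.enumerate_cons]
    by_cases h : y = v
    · subst h
      simp only [pvEventsA, pvRunsGo, ne_eq, not_true_eq_false, if_false, if_true]
      have := ih y (c + 1) (s + 1)
      have he : s + 1 - (c + 1) = s - c := by ring
      rw [he] at this
      exact this
    · obtain ⟨k, t, hk⟩ := pvRunsGo_head ys y 1
      simp only [pvEventsA, pvRunsGo, ne_eq, h, not_false_eq_true, if_true, if_false, hk, pvBounds]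
      have he : s - c + c = s := by ring
      have h2 := ih y 1 (s + 1)
      have he2 : s + 1 - 1 = s := by ring
      rw [he2] at h2
      rw [he, ← hk, ← h2]

-- ===== VERDICT (by name: the statement is the Claim_ definition above) =====
theorem find_changepoints_spec : Claim_equal_find_changepoints := by
  intro arr _ hpre
  unfold Spec_find_changepoints
  cases arr with
  | nil => exact absurd rfl hpre
  | cons a rest =>
    unfold find_changepoints find_changepoints_alt
    have hget : PySem.List.pyGet? (a :: rest) 0 = some a := by
      simp [PySem.List.pyGet?, PySem.List.pyIdx?]
    rw [hget]
    dsimp only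
    rw [foldA_eventsA, foldB_bounds]
    congr 1
    rw [PySem.List.enumerate_cons]
    simp only [pvEventsA, ne_eq, not_true_eq_false, if_false, pvRuns]
    have := eventsA_eq_bounds rest a 1 1
    simp only [show (1:Int) - 1 = 0 from rfl] at this
    rw [show (0:Int) + 1 = 1 from rfl, this]
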